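-- pv_equiv track=rewrite | github.com/hellocnrb/surf-park-scheduler | daily_schedule_builder.py | get_required_roles
-- ===== SOURCE A (Python) =====
-- def get_required_roles(session_type, baseline_coaches, private_lessons):
--     """Determine which roles are needed for a session"""
--     roles = []
--
--     if session_type in ['Beginner', 'Novice']:
--         if baseline_coaches >= 2:
--             roles = ['Pusher', 'Tutor']
--         if baseline_coaches >= 3:
--             roles.append('Flowter')
--     elif session_type == 'Progressive':
--         if baseline_coaches >= 1:
--             roles = ['Coach']
--         if baseline_coaches >= 2:
--             roles.append('Flowter')
--
--     # Add private lesson coaches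
--     for i in range(private_lessons):
--         roles.append(f'Private {i+1}')
--
--     return roles
-- ===== SOURCE B (Python) =====
-- ROLE_TABLE = {
--     'Beginner': [(2, 'Pusher'), (2, 'Tutor'), (3, 'Flowter')],
--     'Novice': [(2, 'Pusher'), (2, 'Tutor'), (3, 'Flowter')],
--     'Progressive': [(1, 'Coach'), (2, 'Flowter')],
-- }
--
-- def get_required_roles(session_type, baseline_coaches, private_lessons):
--     """Determine which roles are needed for a session"""
--     roles = [role for threshold, role in ROLE_TABLE.get(session_type, [])
--              if threshold <= baseline_coaches]
--     roles += [f'Private {i+1}' for i in range(private_lessons)]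
--     return roles
-- ===== Notes on version B (the rewrite author's own statement) =====
-- stated objective: simpler
-- what changed: Replaces the sequential if-branch blocks with a data-driven threshold table (session_type -> ordered (threshold, role) pairs) filtered in one comprehension, and builds the private-lesson entries with a comprehension instead of an append loop.
import Mathlib
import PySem

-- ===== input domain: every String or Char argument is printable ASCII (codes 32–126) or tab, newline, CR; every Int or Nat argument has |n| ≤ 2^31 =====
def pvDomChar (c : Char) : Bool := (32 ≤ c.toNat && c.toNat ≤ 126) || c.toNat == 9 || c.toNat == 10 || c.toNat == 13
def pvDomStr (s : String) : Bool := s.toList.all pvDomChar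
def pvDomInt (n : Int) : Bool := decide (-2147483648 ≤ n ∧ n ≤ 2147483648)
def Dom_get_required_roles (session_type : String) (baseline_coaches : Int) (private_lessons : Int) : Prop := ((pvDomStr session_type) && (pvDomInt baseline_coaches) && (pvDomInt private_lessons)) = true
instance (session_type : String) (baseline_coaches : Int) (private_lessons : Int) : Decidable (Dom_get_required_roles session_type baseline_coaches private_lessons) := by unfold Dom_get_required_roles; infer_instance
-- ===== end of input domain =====

-- B replaces A's sequential if-branch blocks by a threshold table (session_type -> ordered
-- (threshold, role) pairs) filtered in one pass; same cost, simpler decomposition.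

-- ===== PORT A =====
def get_required_roles (session_type : String) (baseline_coaches : Int) (private_lessons : Int) : List String :=
  let roles : List String :=
    if session_type = "Beginner" ∨ session_type = "Novice" then
      let roles := if baseline_coaches ≥ 2 then ["Pusher", "Tutor"] else []
      if baseline_coaches ≥ 3 then roles ++ ["Flowter"] else roles
    else if session_type = "Progressive" then
      let roles := if baseline_coaches ≥ 1 then ["Coach"] else []
      if baseline_coaches ≥ 2 then roles ++ ["Flowter"] else roles
    else []
  (PySem.List.pyRange 0 private_lessons 1).foldl
    (fun acc i => acc ++ ["Private " ++ PySem.Int.toStr (i + 1)]) roles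

-- ===== PORT B =====
def roleTable : PySem.Dict String (List (Int × String)) :=
  PySem.Dict.mk
    [("Beginner", [((2 : Int), "Pusher"), (2, "Tutor"), (3, "Flowter")]),
     ("Novice", [((2 : Int), "Pusher"), (2, "Tutor"), (3, "Flowter")]),
     ("Progressive", [((1 : Int), "Coach"), (2, "Flowter")])]

def get_required_roles_alt (session_type : String) (baseline_coaches : Int) (private_lessons : Int) : List String :=
  let roles :=
    ((PySem.Dict.getD roleTable session_type []).filter
      (fun p => p.1 ≤ baseline_coaches)).map (fun p => p.2)
  roles ++ (PySem.List.pyRange 0 private_lessons 1).map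
    (fun i => "Private " ++ PySem.Int.toStr (i + 1))

-- ===== PRECONDITION & SPEC =====
def Spec_get_required_roles (session_type : String) (baseline_coaches : Int) (private_lessons : Int) (out : List String) : Prop := out = get_required_roles_alt session_type baseline_coaches private_lessons
instance (session_type : String) (baseline_coaches : Int) (private_lessons : Int) (out : List String) : Decidable (Spec_get_required_roles session_type baseline_coaches private_lessons out) := by unfold Spec_get_required_roles; infer_instance

-- ===== CLAIM (what is proved, stated in full; the proofs are below) =====
def Claim_equal_get_required_roles : Prop := ∀ (session_type : String) (baseline_coaches : Int) (private_lessons : Int), Dom_get_required_roles session_type baseline_coaches private_lessons → Spec_get_required_roles session_type baseline_coaches private_lessons (get_required_roles session_type baseline_coaches private_lessons)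

-- ===== LEMMAS AND PROOFS =====
lemma foldl_append_singleton (f : Int → String) :
    ∀ (l : List Int) (init : List String),
      l.foldl (fun acc i => acc ++ [f i]) init = init ++ l.map f := by
  intro l
  induction l with
  | nil => simp
  | cons x xs ih => intro init; simp [List.foldl, ih]

-- ===== VERDICT (by name: the statement is the Claim_ definition above) =====
theorem get_required_roles_spec : Claim_equal_get_required_roles := by
  intro session_type baseline_coaches private_lessons _
  unfold Spec_get_required_roles get_required_roles get_required_roles_alt
  rw [foldl_append_singleton]
  congr 1
  by_cases h1 : session_type = "Beginner" ∨ session_type = "Novice"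
  · rcases h1 with h | h <;> subst h <;>
    · rcases Int.lt_or_le baseline_coaches 2 with hb | hb
      · simp [roleTable, PySem.Dict.getD, PySem.Dict.get?, PySem.Dict.get?_mk_cons,
          List.filter, show ¬ (2:Int) ≤ baseline_coaches by omega,
          show ¬ (3:Int) ≤ baseline_coaches by omega,
          show ¬ baseline_coaches ≥ 2 by omega, show ¬ baseline_coaches ≥ 3 by omega]
      · rcases Int.lt_or_le baseline_coaches 3 with hb3 | hb3
        · simp [roleTable, PySem.Dict.getD, PySem.Dict.get?, PySem.Dict.get?_mk_cons,
            List.filter, hb, show ¬ (3:Int) ≤ baseline_coaches by omega,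
            show baseline_coaches ≥ 2 by omega, show ¬ baseline_coaches ≥ 3 by omega]
        · simp [roleTable, PySem.Dict.getD, PySem.Dict.get?, PySem.Dict.get?_mk_cons,
            List.filter, hb, hb3,
            show baseline_coaches ≥ 2 by omega, show baseline_coaches ≥ 3 by omega]
  · by_cases h2 : session_type = "Progressive"
    · subst h2
      rcases Int.lt_or_le baseline_coaches 1 with hb | hb
      · simp [roleTable, PySem.Dict.getD, PySem.Dict.get?, PySem.Dict.get?_mk_cons,
          List.filter, show ¬ (1:Int) ≤ baseline_coaches by omega,
          show ¬ (2:Int) ≤ baseline_coaches by omega,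
          show ¬ baseline_coaches ≥ 1 by omega, show ¬ baseline_coaches ≥ 2 by omega]
      · rcases Int.lt_or_le baseline_coaches 2 with hb2 | hb2
        · simp [roleTable, PySem.Dict.getD, PySem.Dict.get?, PySem.Dict.get?_mk_cons,
            List.filter, hb, show ¬ (2:Int) ≤ baseline_coaches by omega,
            show baseline_coaches ≥ 1 by omega, show ¬ baseline_coaches ≥ 2 by omega]
        · simp [roleTable, PySem.Dict.getD, PySem.Dict.get?, PySem.Dict.get?_mk_cons,
            List.filter, hb, hb2,
            show baseline_coaches ≥ 1 by omega, show baseline_coaches ≥ 2 by omega]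
    · obtain ⟨hb, hn⟩ := not_or.mp h1
      cases hB : ("Beginner" == session_type) with
      | true => exact absurd ((beq_iff_eq.mp hB).symm) hb
      | false =>
        cases hN : ("Novice" == session_type) with
        | true => exact absurd ((beq_iff_eq.mp hN).symm) hn
        | false =>
          cases hP : ("Progressive" == session_type) with
          | true => exact absurd ((beq_iff_eq.mp hP).symm) h2
          | false =>
            simp [roleTable, PySem.Dict.getD, PySem.Dict.get?, List.find?, hB, hN, hP,
              h1, h2]
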